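-- pv_equiv track=rewrite | github.com/dunkdunkdunk/ComProg1 | Final_Review_01.py | get_consensus
-- ===== SOURCE A (Python) =====
-- def get_consensus(ss):
--     ss=[i.upper() for i in ss.split('\n')]
--     consensus=[]
--     for i in range(len(ss[0])):
--         num=[]
--         for j in ss:
--             num.append(j[i])
--         count=dict()
--         for k in num:
--             if k in count.keys():
--                 count[k]+=1
--             else: count[k]=1
--         m=max(count.values())
--         ans=[]
--         for n in count:
--             if count[n]==m:ans.append(n)
--         ans.sort()
--         consensus.append('/'.join(ans))
--     consensus=' '.join(consensus)
--     return consensus # DO NOT MODIFY THIS LINE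
-- ===== SOURCE B (Python) =====
-- def _column_consensus(col):
--     # sort the column; equal characters become adjacent runs, and runs
--     # appear in alphabetical order, so winners come out already sorted
--     rest = sorted(col)
--     best = 0
--     winners = []
--     while rest:
--         c = rest[0]
--         rest = rest[1:]
--         cnt = 1
--         while rest and rest[0] == c:
--             cnt += 1
--             rest = rest[1:]
--         if best < cnt:
--             best = cnt
--             winners = [c]
--         elif cnt == best:
--             winners.append(c)
--     return '/'.join(winners)
--
--
-- def get_consensus(ss):
--     rows = [r.upper() for r in ss.split('\n')]
--     return ' '.join(_column_consensus([r[i] for r in rows])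
--                     for i in range(len(rows[0])))
-- ===== Notes on version B (the rewrite author's own statement) =====
-- stated objective: alternative
-- what changed: Per-column counting with a hash dict plus a final sort of the winners is replaced by sorting each column once and run-length scanning the adjacent equal runs, so winners emerge already in alphabetical order and no dictionary is built.
import Mathlib
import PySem

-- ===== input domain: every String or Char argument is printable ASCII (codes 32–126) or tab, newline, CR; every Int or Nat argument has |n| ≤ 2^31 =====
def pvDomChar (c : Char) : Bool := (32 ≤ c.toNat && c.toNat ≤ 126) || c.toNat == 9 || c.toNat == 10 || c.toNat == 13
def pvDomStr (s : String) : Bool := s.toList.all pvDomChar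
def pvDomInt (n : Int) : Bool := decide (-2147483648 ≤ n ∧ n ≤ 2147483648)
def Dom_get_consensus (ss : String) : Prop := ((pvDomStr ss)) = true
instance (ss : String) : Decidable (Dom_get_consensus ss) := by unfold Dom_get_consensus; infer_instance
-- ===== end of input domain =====

-- B replaces A's per-column hash-dict counting by sort-the-column + run-length scan
-- (winners emerge already in alphabetical order); objective: alternative algorithm.

-- ===== PORT A =====
-- A, working on List Char (PySem.Chars level); the String wrapper is below
def getConsensusCoreA (s : List Char) : List Char :=
  let rows := (PySem.Chars.splitOn s ['\n']).map PySem.Chars.upper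
  let consensus := (PySem.List.pyRange 0 ((PySem.List.pyGetD rows 0 []).length : Int) 1).foldl
    (fun acc i =>
      let num := rows.foldl (fun n j => n ++ [PySem.List.pyGetD j i ' ']) []
      let count := num.foldl
        (fun d k => if d.contains k then d.insert k (d.getD k 0 + 1) else d.insert k 1)
        (PySem.Dict.empty : PySem.Dict Char Int)
      let m := (PySem.List.max? count.values (fun x => x)).getD 0
      let ans := count.keys.foldl (fun a n => if count.getD n 0 == m then a ++ [n] else a) []
      let ans := PySem.List.sorted ans (fun x => x) false
      acc ++ [PySem.Chars.join ['/'] (ans.map (fun c => [c]))]) []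
  PySem.Chars.join [' '] consensus

def get_consensus (ss : String) : String := String.ofList (getConsensusCoreA ss.toList)

-- ===== PORT B =====
-- the inner `while rest and rest[0] == c` run-consuming loop of Source B
def takeRunB (c : Char) : List Char → Nat × List Char
  | [] => (0, [])
  | x :: xs => if x == c then ((takeRunB c xs).1 + 1, (takeRunB c xs).2) else (0, x :: xs)

theorem takeRunB_len_le (c : Char) (l : List Char) : (takeRunB c l).2.length ≤ l.length := by
  induction l with
  | nil => simp [takeRunB]
  | cons x xs ih =>
    simp only [takeRunB]
    split
    · exact le_trans ih (by simp)
    · simp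

-- the outer `while rest:` loop of Source B (state: best, winners, remaining suffix)
def winnersLoopB (best : Nat) (winners : List Char) : List Char → Nat × List Char
  | [] => (best, winners)
  | c :: rest =>
    let cnt := (takeRunB c rest).1 + 1
    if best < cnt then winnersLoopB cnt [c] (takeRunB c rest).2
    else if cnt == best then winnersLoopB best (winners ++ [c]) (takeRunB c rest).2
    else winnersLoopB best winners (takeRunB c rest).2
  termination_by l => l.length
  decreasing_by
    all_goals exact Nat.lt_succ_of_le (takeRunB_len_le c rest)

def columnConsensusB (col : List Char) : List Char :=
  let sc := PySem.List.sorted col (fun x => x) false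
  PySem.Chars.join ['/'] ((winnersLoopB 0 [] sc).2.map (fun c => [c]))

def getConsensusCoreB (s : List Char) : List Char :=
  let rows := (PySem.Chars.splitOn s ['\n']).map PySem.Chars.upper
  PySem.Chars.join [' ']
    ((PySem.List.pyRange 0 ((PySem.List.pyGetD rows 0 []).length : Int) 1).map
      (fun i => columnConsensusB (rows.map (fun r => PySem.List.pyGetD r i ' '))))

def get_consensus_alt (ss : String) : String := String.ofList (getConsensusCoreB ss.toList)

-- ===== PRECONDITION & SPEC =====
-- A raises IndexError exactly when some later line is shorter than the first line; Pre_ excludes those inputs.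
def Pre_get_consensus (ss : String) : Prop :=
  ∀ r ∈ PySem.Chars.splitOn ss.toList ['\n'],
    ((PySem.Chars.splitOn ss.toList ['\n']).headD []).length ≤ r.length
instance (ss : String) : Decidable (Pre_get_consensus ss) := by unfold Pre_get_consensus; infer_instance

def pvWitness_get_consensus : String := "ac\nGT\nAt"

def Spec_get_consensus (ss : String) (out : String) : Prop := out = get_consensus_alt ss
instance (ss : String) (out : String) : Decidable (Spec_get_consensus ss out) := by unfold Spec_get_consensus; infer_instance

-- ===== CLAIM (what is proved, stated in full; the proofs are below) =====
def Claim_equal_get_consensus : Prop := ∀ (ss : String), Dom_get_consensus ss → Pre_get_consensus ss → Spec_get_consensus ss (get_consensus ss)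

-- ===== LEMMAS AND PROOFS =====

-- A's dict-building step is exactly Counter's modify step
theorem counter_step_eq (d : PySem.Dict Char Int) (k : Char) :
    (if d.contains k then d.insert k (d.getD k 0 + 1) else d.insert k 1)
      = d.modify k 0 (· + 1) := by
  by_cases h : d.contains k = true
  · simp [h, PySem.Dict.modify]
  · have hf : d.items.find? (fun p => p.1 == k) = none := by
      rw [List.find?_eq_none]
      intro x hx hpx
      exact h (List.any_eq_true.mpr ⟨x, hx, hpx⟩)
    simp [h, PySem.Dict.modify, PySem.Dict.getD, PySem.Dict.get?, hf]

theorem counter_values (num : List Char) :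
    (PySem.Dict.counter num).values
      = (PySem.Set.ofList num).map (fun k => ((num.count k : Nat) : Int)) := by
  simp [PySem.Dict.values, PySem.Dict.items_counter, List.map_map, Function.comp]

-- specialised loop-shape lemmas
theorem foldl_append_if_id (p : Char → Bool) (l acc : List Char) :
    l.foldl (fun a n => if p n then a ++ [n] else a) acc = acc ++ l.filter p := by
  induction l generalizing acc with
  | nil => simp
  | cons x xs ih =>
    by_cases h : p x <;> simp [h, ih, List.filter_cons]

-- Nat foldl-max facts
theorem foldl_max_ge (ns : List Nat) (a : Nat) : a ≤ ns.foldl max a := by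
  induction ns generalizing a with
  | nil => simp
  | cons n ns ih => exact le_trans (Nat.le_max_left a n) (ih (max a n))

theorem foldl_max_mem (ns : List Nat) (a : Nat) : ns.foldl max a = a ∨ ns.foldl max a ∈ ns := by
  induction ns generalizing a with
  | nil => simp
  | cons n ns ih =>
    rcases ih (max a n) with h | h
    · rcases max_choice a n with hm | hm
      · left; simpa [hm] using h
      · right; rw [List.foldl_cons, h, hm]; exact List.mem_cons_self
    · right; exact List.mem_cons_of_mem _ h

theorem foldl_max_le (ns : List Nat) (a : Nat) : ∀ y ∈ ns, y ≤ ns.foldl max a := by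
  induction ns generalizing a with
  | nil => simp
  | cons n ns ih =>
    intro y hy
    rcases List.mem_cons.mp hy with rfl | hy
    · exact le_trans (Nat.le_max_right a y) (foldl_max_ge ns _)
    · exact ih (max a n) y hy

-- takeRunB on a sorted list whose elements all dominate c: it strips the leading run of c
theorem takeRun_split (c : Char) (l : List Char) (hall : ∀ y ∈ l, c ≤ y)
    (hp : l.Pairwise (· ≤ ·)) :
    l = List.replicate (takeRunB c l).1 c ++ (takeRunB c l).2 ∧
    (∀ y ∈ (takeRunB c l).2, c < y) ∧ (takeRunB c l).2.Pairwise (· ≤ ·) := by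
  induction l with
  | nil => simp [takeRunB]
  | cons x xs ih =>
    rw [List.pairwise_cons] at hp
    by_cases hx : x = c
    · subst hx
      obtain ⟨h1, h2, h3⟩ := ih (fun y hy => hp.1 y hy) hp.2
      refine ⟨?_, ?_, ?_⟩
      · simp only [takeRunB, BEq.rfl, if_pos, List.replicate_succ, List.cons_append]
        exact congrArg (x :: ·) h1
      · simpa [takeRunB] using h2
      · simpa [takeRunB] using h3
    · have hcx : c < x := lt_of_le_of_ne (hall x List.mem_cons_self) (Ne.symm hx)
      have hbe : (x == c) = false := beq_false_of_ne hx
      refine ⟨by simp [takeRunB, hbe], ?_, ?_⟩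
      · intro y hy
        simp only [takeRunB, hbe, if_neg, Bool.false_eq_true, not_false_iff] at hy
        rcases List.mem_cons.mp hy with rfl | hy
        · exact hcx
        · exact lt_of_lt_of_le hcx (hp.1 y hy)
      · simpa [takeRunB, hbe] using List.pairwise_cons.mpr hp

-- the run decomposition of a list (proof-side mirror of Source B's outer loop)
def groupsOf : List Char → List (Char × Nat)
  | [] => []
  | c :: rest => (c, (takeRunB c rest).1 + 1) :: groupsOf (takeRunB c rest).2
  termination_by l => l.length
  decreasing_by exact Nat.lt_succ_of_le (takeRunB_len_le c rest)

def step2 (bw : Nat × List Char) (g : Char × Nat) : Nat × List Char :=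
  if bw.1 < g.2 then (g.2, [g.1]) else if g.2 == bw.1 then (bw.1, bw.2 ++ [g.1]) else bw

theorem winnersLoop_eq_foldl (l : List Char) :
    ∀ b w, winnersLoopB b w l = (groupsOf l).foldl step2 (b, w) := by
  induction l using groupsOf.induct with
  | case1 => intro b w; simp [winnersLoopB, groupsOf]
  | case2 c rest ih =>
    intro b w
    rw [groupsOf, List.foldl_cons, winnersLoopB]
    simp only [step2]
    split_ifs with h1 h2 <;> simp_all [ih]

theorem groups_spec (l : List Char) (hp : l.Pairwise (· ≤ ·)) :
    (∀ p ∈ groupsOf l, p.2 = l.count p.1) ∧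
    ((groupsOf l).map Prod.fst).Pairwise (· < ·) ∧
    (∀ c, c ∈ (groupsOf l).map Prod.fst ↔ c ∈ l) := by
  induction l using groupsOf.induct with
  | case1 => simp [groupsOf]
  | case2 c rest ih =>
    rw [List.pairwise_cons] at hp
    obtain ⟨hsplit, hgt, hp'⟩ := takeRun_split c rest hp.1 hp.2
    obtain ⟨ih1, ih2, ih3⟩ := ih hp'
    have hnotc : (takeRunB c rest).2.count c = 0 := by
      rw [List.count_eq_zero]
      intro hc
      exact lt_irrefl c (hgt c hc)
    refine ⟨?_, ?_, ?_⟩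
    · intro p hp2
      rw [groupsOf] at hp2
      rcases List.mem_cons.mp hp2 with rfl | hp2
      · have hrc : rest.count c = (takeRunB c rest).1 := by
          conv_lhs => rw [hsplit]
          simp [List.count_append, List.count_replicate, hnotc]
        simp [List.count_cons_self, hrc]
      · have h1 := ih1 p hp2
        have hpmem : p.1 ∈ (takeRunB c rest).2 := by
          rw [← ih3]; exact List.mem_map_of_mem hp2
        have hpc : c < p.1 := hgt _ hpmem
        have hne : p.1 ≠ c := fun h => lt_irrefl c (h ▸ hpc)
        rw [h1]
        conv_rhs => rw [hsplit]
        simp [List.count_cons, List.count_append, List.count_replicate, hne, Ne.symm hne]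
    · rw [groupsOf, List.map_cons, List.pairwise_cons]
      refine ⟨?_, ih2⟩
      intro d hd
      have : d ∈ (takeRunB c rest).2 := (ih3 d).mp hd
      exact hgt d this
    · intro c'
      rw [groupsOf, List.map_cons, List.mem_cons, ih3, List.mem_cons]
      constructor
      · rintro (rfl | h)
        · left; rfl
        · right; rw [hsplit]; exact List.mem_append_right _ h
      · rintro (rfl | h)
        · left; rfl
        · rw [hsplit] at h
          rcases List.mem_append.mp h with h | h
          · left; exact (List.eq_of_mem_replicate h)
          · right; exact h

def maxSnd (b : Nat) (gs : List (Char × Nat)) : Nat := gs.foldl (fun a g => max a g.2) b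

theorem maxSnd_eq_foldl_map (b : Nat) (gs : List (Char × Nat)) :
    maxSnd b gs = (gs.map Prod.snd).foldl max b := by
  simp [maxSnd, List.foldl_map]

theorem foldl_step2_spec (gs : List (Char × Nat)) :
    ∀ b w, gs.foldl step2 (b, w) =
      (maxSnd b gs,
       (if b = maxSnd b gs then w else []) ++
         (gs.filter (fun g => g.2 == maxSnd b gs)).map Prod.fst) := by
  induction gs with
  | nil => intro b w; simp [maxSnd]
  | cons g rest ih =>
    intro b w
    have hms : maxSnd b (g :: rest) = maxSnd (max b g.2) rest := rfl
    have hle : max b g.2 ≤ maxSnd (max b g.2) rest := by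
      rw [maxSnd_eq_foldl_map]; exact foldl_max_ge _ _
    rw [List.foldl_cons, hms]
    set M := maxSnd (max b g.2) rest with hM
    by_cases h1 : b < g.2
    · have hbg : max b g.2 = g.2 := Nat.max_eq_right (Nat.le_of_lt h1)
      rw [hbg] at hM hle
      have hbM : b ≠ M := by omega
      rw [show step2 (b, w) g = (g.2, [g.1]) from by simp [step2, h1], ih, ← hM]
      by_cases h2 : g.2 = M
      · simp [List.filter_cons, h2, hbM]
      · simp [List.filter_cons, hbM, (beq_false_of_ne h2), h2]
    · have hbg : max b g.2 = b := Nat.max_eq_left (Nat.not_lt.mp h1)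
      rw [hbg] at hM hle
      by_cases h2 : g.2 = b
      · rw [show step2 (b, w) g = (b, w ++ [g.1]) from by simp [step2, h1, h2], ih, ← hM]
        by_cases h3 : b = M
        · simp [List.filter_cons, h2, h3, List.append_assoc]
        · have hgM : (g.2 == M) = false := beq_false_of_ne (by omega)
          simp [List.filter_cons, h3, hgM]
      · have hlt : g.2 < b := by omega
        rw [show step2 (b, w) g = (b, w) from by simp [step2, h1, h2], ih, ← hM]
        have hgM : (g.2 == M) = false := beq_false_of_ne (by omega)
        simp [List.filter_cons, hgM]

theorem filter_map_fst (p : Char → Bool) (gs : List (Char × Nat)) (q : Char × Nat → Bool)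
    (h : ∀ g ∈ gs, q g = p g.1) :
    (gs.filter q).map Prod.fst = (gs.map Prod.fst).filter p := by
  induction gs with
  | nil => simp
  | cons g rest ih =>
    have hg := h g List.mem_cons_self
    have ih' := ih (fun g hg => h g (List.mem_cons_of_mem _ hg))
    by_cases hq : q g = true
    · simp [List.filter_cons, hq, hg ▸ hq, ih']
    · have hq' : q g = false := Bool.eq_false_iff.mpr hq
      simp [List.filter_cons, hq', hg ▸ hq', ih']

-- the central per-column equivalence
theorem col_eq (num : List Char) :
    PySem.List.sorted
      ((PySem.Set.ofList num).filter
        (fun c => ((num.count c : Nat) : Int) ==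
          (PySem.List.max? ((PySem.Set.ofList num).map (fun k => ((num.count k : Nat) : Int)))
            (fun x => x)).getD 0))
      (fun x => x) false
    = (winnersLoopB 0 [] (PySem.List.sorted num (fun x => x) false)).2 := by
  rcases eq_or_ne num [] with rfl | hne
  · simp [winnersLoopB, PySem.List.sorted, PySem.Set.ofList]
  · obtain ⟨c0, hc0⟩ := List.exists_mem_of_ne_nil num hne
    set sl := PySem.List.sorted num (fun x => x) false with hsl
    have hsp : sl.Pairwise (· ≤ ·) := PySem.List.sorted_pairwise num (fun x => x)
    have hperm : sl.Perm num := PySem.List.sorted_perm num (fun x => x) false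
    obtain ⟨h1, h2, h3⟩ := groups_spec sl hsp
    have hcount : ∀ c, sl.count c = num.count c := fun c => hperm.count_eq c
    set gs := groupsOf sl with hgs
    set B := maxSnd 0 gs with hB
    -- the RHS
    rw [winnersLoop_eq_foldl, foldl_step2_spec]
    simp only [← hgs, ← hB]
    have hpre : (if 0 = B then ([] : List Char) else []) = [] := by split <;> rfl
    rw [hpre, List.nil_append]
    -- max? is some m
    set vals := (PySem.Set.ofList num).map (fun k => ((num.count k : Nat) : Int)) with hvals
    have hvne : vals ≠ [] := by
      have : c0 ∈ PySem.Set.ofList num := (PySem.Set.mem_ofList num c0).mpr hc0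
      intro h
      rw [hvals, List.map_eq_nil_iff] at h
      rw [h] at this
      exact List.not_mem_nil this
    obtain ⟨v, vt, hvvt⟩ := List.exists_cons_of_ne_nil hvne
    obtain ⟨m, hm⟩ : ∃ m, PySem.List.max? vals (fun x => x) = some m :=
      ⟨vt.foldl max v, by rw [hvvt]; exact PySem.List.max?_id_cons v vt⟩
    have hmmem := PySem.List.max?_mem hm
    have hmmax := PySem.List.max?_isMax hm
    -- m = B
    have hBle : ∀ g ∈ gs, g.2 ≤ B := by
      intro g hg
      rw [hB, maxSnd_eq_foldl_map]
      exact foldl_max_le _ _ _ (List.mem_map_of_mem hg)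
    have hmB : m = (B : Int) := by
      have hle2 : m ≤ (B : Int) := by
        rw [hvals] at hmmem
        obtain ⟨c, hcin, rfl⟩ := List.mem_map.mp hmmem
        have hcnum : c ∈ num := (PySem.Set.mem_ofList num c).mp hcin
        have hcsl : c ∈ sl := (PySem.List.mem_sorted num _ false c).mpr hcnum
        have hcfst : c ∈ gs.map Prod.fst := (h3 c).mpr hcsl
        obtain ⟨g, hg, hgc⟩ := List.mem_map.mp hcfst
        have : g.2 = num.count c := by rw [h1 g hg, hgc, hcount]
        have := hBle g hg
        omega
      have hle1 : (B : Int) ≤ m := by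
        rcases (by rw [hB, maxSnd_eq_foldl_map]; exact foldl_max_mem _ _ :
            B = 0 ∨ B ∈ gs.map Prod.snd) with h0 | hmem
        · rw [h0]
          rw [hvals] at hmmem
          obtain ⟨c, _, rfl⟩ := List.mem_map.mp hmmem
          positivity
        · obtain ⟨g, hg, hgB⟩ := List.mem_map.mp hmem
          have hfst : g.1 ∈ gs.map Prod.fst := List.mem_map_of_mem hg
          have hnum : g.1 ∈ num := (PySem.List.mem_sorted num _ false g.1).mp ((h3 g.1).mp hfst)
          have hv : ((num.count g.1 : Nat) : Int) ∈ vals := by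
            rw [hvals]
            exact List.mem_map_of_mem ((PySem.Set.mem_ofList num g.1).mpr hnum)
          have := hmmax _ hv
          have : g.2 = num.count g.1 := by rw [h1 g hg, hcount]
          omega
      exact le_antisymm hle2 hle1
    -- winners = filter over fst
    have hwin : (gs.filter (fun g => g.2 == B)).map Prod.fst
        = (gs.map Prod.fst).filter (fun c => ((num.count c : Nat) : Int) == m) := by
      apply filter_map_fst
      intro g hg
      have : g.2 = num.count g.1 := by rw [h1 g hg, hcount]
      rw [hmB, this]
      by_cases h : num.count g.1 = B
      · simp [h]
      · simp [beq_false_of_ne h, beq_false_of_ne (fun hh => h (Int.natCast_inj.mp hh))]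
    rw [hm]
    rw [hwin]
    -- A's sorted filter equals that list
    have hnodup : (gs.map Prod.fst).Nodup := h2.imp ne_of_lt
    have hpermfst : (gs.map Prod.fst).Perm (PySem.Set.ofList num) := by
      rw [List.perm_ext_iff_of_nodup hnodup (PySem.Set.nodup_ofList num)]
      intro c
      rw [h3 c, PySem.List.mem_sorted, PySem.Set.mem_ofList]
    apply PySem.List.sorted_eq_of_perm_of_pairwise_lt
    · exact hpermfst.filter _
    · exact h2.filter _

-- column reconciliation and the full-core equality (the ports agree on every input;
-- Pre_ is what keeps the PYTHON A, which raises IndexError on ragged rows, inside its return domain)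
theorem core_eq (s : List Char) :
    getConsensusCoreA s = getConsensusCoreB s := by
  simp only [getConsensusCoreA, getConsensusCoreB]
  rw [PySem.List.foldl_append_singleton_eq_map, List.nil_append]
  apply congrArg (PySem.Chars.join [' '])
  apply List.map_congr_left
  intro i _
  set rows := (PySem.Chars.splitOn s ['\n']).map PySem.Chars.upper with hrows
  rw [PySem.List.foldl_append_singleton_eq_map, List.nil_append]
  set num := rows.map (fun j => PySem.List.pyGetD j i ' ') with hnum
  have hcnt : num.foldl
      (fun d k => if d.contains k then d.insert k (d.getD k 0 + 1) else d.insert k 1)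
      (PySem.Dict.empty : PySem.Dict Char Int) = PySem.Dict.counter num := by
    rw [PySem.List.foldl_congr_mem num _ (fun d x => d.modify x 0 (· + 1)) _
      (fun acc x _ => counter_step_eq acc x)]
    exact (PySem.Dict.counter_eq_foldl num).symm
  rw [hcnt, counter_values, PySem.Dict.keys_counter,
    foldl_append_if_id, List.nil_append]
  have hfil : (PySem.Set.ofList num).filter
        (fun n => (PySem.Dict.counter num).getD n 0 ==
          (PySem.List.max? ((PySem.Set.ofList num).map (fun k => ((num.count k : Nat) : Int)))
            (fun x => x)).getD 0)
      = (PySem.Set.ofList num).filter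
        (fun c => ((num.count c : Nat) : Int) ==
          (PySem.List.max? ((PySem.Set.ofList num).map (fun k => ((num.count k : Nat) : Int)))
            (fun x => x)).getD 0) := by
    apply List.filter_congr
    intro c _
    rw [PySem.Dict.getD_counter]
  rw [hfil]
  unfold columnConsensusB
  exact congrArg (PySem.Chars.join ['/']) (congrArg (List.map (fun c => [c])) (col_eq num))

-- ===== VERDICT (by name: the statement is the Claim_ definition above) =====
theorem get_consensus_spec : Claim_equal_get_consensus := by
  intro ss _ _
  unfold Spec_get_consensus get_consensus get_consensus_alt
  exact congrArg String.ofList (core_eq ss.toList)
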